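-- pv_equiv track=rewrite | github.com/thomast8/auto-scientist | src/auto_scientist/agents/_prediction_mcp_server.py | _build_status
-- ===== SOURCE A (Python) =====
-- def _build_status(predictions: list[dict]) -> str:
--     """Build a counts-only status summary (no tree, since tree is inline in prompt)."""
--     by_status: dict[str, int] = {}
--     for rec in predictions:
--         outcome = rec.get("outcome", "pending")
--         by_status[outcome] = by_status.get(outcome, 0) + 1
--
--     lines = [f"Total: {len(predictions)} predictions"]
--     for status in ["confirmed", "refuted", "inconclusive", "pending"]:
--         count = by_status.get(status, 0)
--         if count:
--             lines.append(f"  {status}: {count}")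
--     return "\n".join(lines)
-- ===== SOURCE B (Python) =====
-- def _build_status(predictions: list[dict]) -> str:
--     """Build a counts-only status summary (no tree, since tree is inline in prompt)."""
--     lines = [f"Total: {len(predictions)} predictions"]
--     for status in ("confirmed", "refuted", "inconclusive", "pending"):
--         count = sum(1 for rec in predictions if rec.get("outcome", "pending") == status)
--         if count:
--             lines.append(f"  {status}: {count}")
--     return "\n".join(lines)
-- ===== Notes on version B (the rewrite author's own statement) =====
-- stated objective: simpler
-- what changed: Drops the by_status dict entirely: each of the four fixed statuses is counted by an in-line rescan of predictions, instead of one pass building a counter index that is then looked up.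
import Mathlib
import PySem

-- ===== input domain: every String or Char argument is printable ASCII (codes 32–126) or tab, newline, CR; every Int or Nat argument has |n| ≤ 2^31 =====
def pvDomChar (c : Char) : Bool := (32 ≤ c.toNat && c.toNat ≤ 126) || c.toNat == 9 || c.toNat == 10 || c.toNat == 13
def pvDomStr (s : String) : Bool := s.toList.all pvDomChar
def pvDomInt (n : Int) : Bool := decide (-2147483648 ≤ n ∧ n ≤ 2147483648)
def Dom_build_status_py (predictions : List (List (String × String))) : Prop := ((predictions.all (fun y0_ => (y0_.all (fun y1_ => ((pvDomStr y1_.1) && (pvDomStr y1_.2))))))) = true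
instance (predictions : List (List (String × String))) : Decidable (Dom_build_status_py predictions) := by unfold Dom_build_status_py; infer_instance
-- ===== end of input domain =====

-- B drops the by_status dict: each fixed status is counted by an in-line rescan of predictions (simpler).

-- shared port of Python's rec.get(k, dflt) on an association-list dict (first match)
def recGet (rec : List (String × String)) (k dflt : String) : String :=
  ((rec.find? (fun p => p.1 == k)).map Prod.snd).getD dflt

-- ===== PORT A =====
def build_status_py (predictions : List (List (String × String))) : String :=
  let by_status : PySem.Dict String Int := predictions.foldl
    (fun d rec =>
      d.insert (recGet rec "outcome" "pending")
        (d.getD (recGet rec "outcome" "pending") 0 + 1))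
    PySem.Dict.empty
  let lines := ["confirmed", "refuted", "inconclusive", "pending"].foldl
    (fun ls status =>
      let count := by_status.getD status 0
      if count ≠ 0 then ls ++ ["  " ++ status ++ ": " ++ PySem.Int.toStr count] else ls)
    ["Total: " ++ PySem.Int.toStr predictions.length ++ " predictions"]
  PySem.Str.join "\n" lines

-- ===== PORT B =====
-- sum(1 for rec in predictions if rec.get("outcome", "pending") == status)
def countStatus (predictions : List (List (String × String))) (status : String) : Int :=
  predictions.foldl (fun n rec => if recGet rec "outcome" "pending" = status then n + 1 else n) 0

def build_status_py_alt (predictions : List (List (String × String))) : String :=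
  let lines := ["confirmed", "refuted", "inconclusive", "pending"].foldl
    (fun ls status =>
      let count := countStatus predictions status
      if count ≠ 0 then ls ++ ["  " ++ status ++ ": " ++ PySem.Int.toStr count] else ls)
    ["Total: " ++ PySem.Int.toStr predictions.length ++ " predictions"]
  PySem.Str.join "\n" lines

-- ===== PRECONDITION & SPEC =====
def Spec_build_status_py (predictions : List (List (String × String))) (out : String) : Prop := out = build_status_py_alt predictions
instance (predictions : List (List (String × String))) (out : String) : Decidable (Spec_build_status_py predictions out) := by unfold Spec_build_status_py; infer_instance

-- ===== CLAIM (what is proved, stated in full; the proofs are below) =====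
def Claim_equal_build_status_py : Prop := ∀ (predictions : List (List (String × String))), Dom_build_status_py predictions → Spec_build_status_py predictions (build_status_py predictions)

-- ===== LEMMAS AND PROOFS =====

-- A's counter dict, looked up at s, equals B's rescan count (invariant over the fold).
theorem counter_key (preds : List (List (String × String))) (d : PySem.Dict String Int) (s : String) :
    (preds.foldl
      (fun d rec =>
        d.insert (recGet rec "outcome" "pending")
          (d.getD (recGet rec "outcome" "pending") 0 + 1)) d).getD s 0
    = preds.foldl (fun n rec => if recGet rec "outcome" "pending" = s then n + 1 else n) (d.getD s 0) := by
  induction preds generalizing d with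
  | nil => rfl
  | cons rec rest ih =>
    simp only [List.foldl_cons]
    rw [ih]
    congr 1
    rw [PySem.Dict.getD_insert]
    by_cases h : recGet rec "outcome" "pending" = s
    · simp [h]
    · simp [h, Ne.symm h]

theorem counter_empty (preds : List (List (String × String))) (s : String) :
    (preds.foldl
      (fun d rec =>
        d.insert (recGet rec "outcome" "pending")
          (d.getD (recGet rec "outcome" "pending") 0 + 1)) PySem.Dict.empty).getD s 0
    = countStatus preds s := by
  rw [counter_key, countStatus, PySem.Dict.getD_empty]

-- ===== VERDICT (by name: the statement is the Claim_ definition above) =====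
theorem build_status_py_spec : Claim_equal_build_status_py := by
  intro preds _
  unfold Spec_build_status_py build_status_py build_status_py_alt
  simp only [List.foldl_cons, List.foldl_nil, counter_empty]
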